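-- pv_equiv track=rewrite | github.com/jorritnoppe/house-ai-architecture | house-agent/services/agent_router_bridge.py | _normalize_room_role
-- ===== SOURCE A (Python) =====
-- def _normalize_room_role(room_name, room_payload):
--     """
--     Infer room role from room metadata and room name.
--     This lets us treat hallway/bathroom/storage differently from desk/living/bedroom.
--     """
--     payload = room_payload or {}
--     name = (room_name or "").strip().lower()
--
--     explicit_role = (
--         payload.get("room_role")
--         or payload.get("role")
--         or payload.get("room_type")
--         or payload.get("type")
--     )
--     if isinstance(explicit_role, str) and explicit_role.strip():
--         role = explicit_role.strip().lower()
--     else: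
--         role = ""
--
--     text = f"{name} {role}".strip()
--
--     if any(token in text for token in ["hall", "hallway", "gang", "corridor", "entrance", "entry", "landing", "stairs", "stair"]):
--         return "transitional"
--
--     if any(token in text for token in ["bath", "badkamer", "toilet", "wc", "shower"]):
--         return "bathroom"
--
--     if any(token in text for token in ["living", "woon", "salon", "tv room", "family room"]):
--         return "living"
--
--     if any(token in text for token in ["desk", "office", "bureau", "study", "computer"]):
--         return "desk"
--
--     if any(token in text for token in ["bed", "bedroom", "master", "guest room", "slaap"]):
--         return "bedroom"
--
--     if any(token in text for token in ["kitchen", "keuken", "dining", "eet"]):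
--         return "kitchen"
--
--     if any(token in text for token in ["child", "kids", "kid", "nursery", "playroom"]):
--         return "child"
--
--     if any(token in text for token in ["attic", "zolder", "loft"]):
--         return "attic"
--
--     if any(token in text for token in ["storage", "closet", "utility", "iot", "server", "technical", "tech", "boiler", "meter", "garage", "shed"]):
--         return "utility"
--
--     return "general"
-- ===== SOURCE B (Python) =====
-- _ROLE_TOKENS = [
--     ("transitional", ["hall", "hallway", "gang", "corridor", "entrance", "entry", "landing", "stairs", "stair"]),
--     ("bathroom", ["bath", "badkamer", "toilet", "wc", "shower"]),
--     ("living", ["living", "woon", "salon", "tv room", "family room"]),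
--     ("desk", ["desk", "office", "bureau", "study", "computer"]),
--     ("bedroom", ["bed", "bedroom", "master", "guest room", "slaap"]),
--     ("kitchen", ["kitchen", "keuken", "dining", "eet"]),
--     ("child", ["child", "kids", "kid", "nursery", "playroom"]),
--     ("attic", ["attic", "zolder", "loft"]),
--     ("utility", ["storage", "closet", "utility", "iot", "server", "technical", "tech", "boiler", "meter", "garage", "shed"]),
-- ]
-- # inverted index: substring -> role (all 45 tokens are distinct), plus the token lengths
-- _TOKEN_ROLE = {tok: role for role, toks in _ROLE_TOKENS for tok in toks}
-- _LENGTHS = sorted({len(t) for t in _TOKEN_ROLE})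
-- _PRIORITY = [role for role, _ in _ROLE_TOKENS]
--
--
-- def _normalize_room_role(room_name, room_payload):
--     payload = room_payload or {}
--     name = (room_name or "").strip().lower()
--     explicit_role = (
--         payload.get("room_role")
--         or payload.get("role")
--         or payload.get("room_type")
--         or payload.get("type")
--     )
--     if isinstance(explicit_role, str) and explicit_role.strip():
--         role = explicit_role.strip().lower()
--     else:
--         role = ""
--     text = f"{name} {role}".strip()
--
--     # one pass over the text: hash every candidate substring into the inverted
--     # index instead of scanning the text once per keyword
--     found = set()
--     for i in range(len(text)):
--         for L in _LENGTHS: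
--             hit = _TOKEN_ROLE.get(text[i:i + L])
--             if hit is not None:
--                 found.add(hit)
--     for role in _PRIORITY:
--         if role in found:
--             return role
--     return "general"
-- ===== Notes on version B (the rewrite author's own statement) =====
-- stated objective: alternative
-- what changed: Instead of scanning the text once per keyword with 'tok in text' through a nine-branch cascade, B builds an inverted index (substring -> role dict) once, makes a single pass over the text positions hashing every candidate substring into it to collect the set of matched roles, and then returns the first role of the priority list present in that set.
import Mathlib
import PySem

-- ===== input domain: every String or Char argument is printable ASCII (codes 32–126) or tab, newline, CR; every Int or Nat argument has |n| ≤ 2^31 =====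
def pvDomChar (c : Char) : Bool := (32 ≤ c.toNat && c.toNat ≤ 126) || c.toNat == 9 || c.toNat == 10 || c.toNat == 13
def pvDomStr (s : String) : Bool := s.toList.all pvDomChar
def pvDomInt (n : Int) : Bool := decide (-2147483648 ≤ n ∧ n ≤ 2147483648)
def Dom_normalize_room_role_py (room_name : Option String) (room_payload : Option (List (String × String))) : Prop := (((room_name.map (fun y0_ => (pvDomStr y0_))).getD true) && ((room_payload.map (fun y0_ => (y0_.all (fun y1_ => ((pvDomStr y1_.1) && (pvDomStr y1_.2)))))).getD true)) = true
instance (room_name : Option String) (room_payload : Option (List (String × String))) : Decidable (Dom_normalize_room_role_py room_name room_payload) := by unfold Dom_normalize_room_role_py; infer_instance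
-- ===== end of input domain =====

-- B replaces A's per-keyword substring scans (nine any(tok in text) branches) by an
-- inverted index: one pass over the text positions hashes every candidate substring
-- into a token→role dict, collecting the matched roles in a set; the answer is the
-- first role of the priority list found in that set (objective: alternative).

-- Python's `x or y` on the Option-String results of dict.get (None and "" are falsy)
def pvOrStr (a b : Option String) : Option String :=
  match a with
  | some s => if s = "" then b else some s
  | none => b

-- shared by both ports: payload/name/explicit-role extraction and f"{name} {role}".strip(),
-- verbatim identical lines in A and B (B keeps them unchanged)
def pvRoomText (room_name : Option String) (room_payload : Option (List (String × String))) : String :=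
  let payload : PySem.Dict String String := PySem.Dict.mk (room_payload.getD [])
  let name := PySem.Str.lower (PySem.Str.strip (room_name.getD ""))
  let explicit_role :=
    pvOrStr (payload.get? "room_role")
      (pvOrStr (payload.get? "role")
        (pvOrStr (payload.get? "room_type") (payload.get? "type")))
  let role :=
    match explicit_role with
    | some s => if PySem.Str.strip s = "" then "" else PySem.Str.lower (PySem.Str.strip s)
    | none => ""
  PySem.Str.strip (PySem.Str.join " " [name, role])

-- ===== PORT A =====
def normalize_room_role_py (room_name : Option String) (room_payload : Option (List (String × String))) : String :=
  let text := pvRoomText room_name room_payload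
  if (["hall", "hallway", "gang", "corridor", "entrance", "entry", "landing", "stairs", "stair"].any (fun token => PySem.Str.isIn token text)) then "transitional"
  else if (["bath", "badkamer", "toilet", "wc", "shower"].any (fun token => PySem.Str.isIn token text)) then "bathroom"
  else if (["living", "woon", "salon", "tv room", "family room"].any (fun token => PySem.Str.isIn token text)) then "living"
  else if (["desk", "office", "bureau", "study", "computer"].any (fun token => PySem.Str.isIn token text)) then "desk"
  else if (["bed", "bedroom", "master", "guest room", "slaap"].any (fun token => PySem.Str.isIn token text)) then "bedroom"
  else if (["kitchen", "keuken", "dining", "eet"].any (fun token => PySem.Str.isIn token text)) then "kitchen"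
  else if (["child", "kids", "kid", "nursery", "playroom"].any (fun token => PySem.Str.isIn token text)) then "child"
  else if (["attic", "zolder", "loft"].any (fun token => PySem.Str.isIn token text)) then "attic"
  else if (["storage", "closet", "utility", "iot", "server", "technical", "tech", "boiler", "meter", "garage", "shed"].any (fun token => PySem.Str.isIn token text)) then "utility"
  else "general"

-- ===== PORT B =====
def pvGroups : List (String × List String) :=
  [("transitional", ["hall", "hallway", "gang", "corridor", "entrance", "entry", "landing", "stairs", "stair"]),
   ("bathroom", ["bath", "badkamer", "toilet", "wc", "shower"]),
   ("living", ["living", "woon", "salon", "tv room", "family room"]),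
   ("desk", ["desk", "office", "bureau", "study", "computer"]),
   ("bedroom", ["bed", "bedroom", "master", "guest room", "slaap"]),
   ("kitchen", ["kitchen", "keuken", "dining", "eet"]),
   ("child", ["child", "kids", "kid", "nursery", "playroom"]),
   ("attic", ["attic", "zolder", "loft"]),
   ("utility", ["storage", "closet", "utility", "iot", "server", "technical", "tech", "boiler", "meter", "garage", "shed"])]

-- inverted index: substring -> role (all 45 tokens are distinct), token lengths, priority order
def pvTable : List (String × String) :=
  pvGroups.flatMap (fun g => g.2.map (fun t => (t, g.1)))

def pvTokenRole : PySem.Dict String String := PySem.Dict.mk pvTable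

def pvLens : List Int :=
  PySem.List.sorted (PySem.Set.ofList (pvTable.map (fun p => PySem.Str.len p.1))) (fun x => x)

def pvPriority : List String := pvGroups.map (fun g => g.1)

def normalize_room_role_py_alt (room_name : Option String) (room_payload : Option (List (String × String))) : String :=
  let text := pvRoomText room_name room_payload
  let found := (PySem.List.pyRange 0 (PySem.Str.len text) 1).foldl
    (fun (found : PySem.Set String) i =>
      pvLens.foldl
        (fun (found : PySem.Set String) L =>
          match pvTokenRole.get? (PySem.Str.slice text (some i) (some (i + L))) with
          | some hit => found.add hit
          | none => found)
        found)
    PySem.Set.empty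
  match pvPriority.find? (fun role => found.contains role) with
  | some role => role
  | none => "general"

-- ===== PRECONDITION & SPEC =====
def Spec_normalize_room_role_py (room_name : Option String) (room_payload : Option (List (String × String))) (out : String) : Prop := out = normalize_room_role_py_alt room_name room_payload
instance (room_name : Option String) (room_payload : Option (List (String × String))) (out : String) : Decidable (Spec_normalize_room_role_py room_name room_payload out) := by unfold Spec_normalize_room_role_py; infer_instance

-- ===== CLAIM (what is proved, stated in full; the proofs are below) =====
def Claim_equal_normalize_room_role_py : Prop := ∀ (room_name : Option String) (room_payload : Option (List (String × String))), Dom_normalize_room_role_py room_name room_payload → Spec_normalize_room_role_py room_name room_payload (normalize_room_role_py room_name room_payload)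

-- ===== LEMMAS AND PROOFS =====

-- membership in B's inner fold (over candidate lengths) of Set.add's
theorem pv_mem_fold_inner (g : Int → Option String) (lens : List Int) (s : PySem.Set String) (r : String) :
    (r ∈ lens.foldl
        (fun (s : PySem.Set String) L =>
          match g L with
          | some hit => s.add hit
          | none => s) s)
      ↔ r ∈ s ∨ ∃ L ∈ lens, g L = some r := by
  induction lens generalizing s with
  | nil => simp
  | cons L lens ih =>
      simp only [List.foldl_cons, List.mem_cons]
      cases hL : g L with
      | none =>
          rw [ih]
          constructor
          · rintro (h | ⟨L', hL', hg⟩)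
            · exact Or.inl h
            · exact Or.inr ⟨L', Or.inr hL', hg⟩
          · rintro (h | ⟨L', (rfl | hL'), hg⟩)
            · exact Or.inl h
            · exact absurd hg (by simp [hL])
            · exact Or.inr ⟨L', hL', hg⟩
      | some v =>
          rw [ih]
          simp only [PySem.Set.mem_add]
          constructor
          · rintro ((h | rfl) | ⟨L', hL', hg⟩)
            · exact Or.inl h
            · exact Or.inr ⟨L, Or.inl rfl, hL⟩
            · exact Or.inr ⟨L', Or.inr hL', hg⟩
          · rintro (h | ⟨L', (rfl | hL'), hg⟩)
            · exact Or.inl (Or.inl h)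
            · rw [hL] at hg; exact Or.inl (Or.inr (Option.some_inj.mp hg).symm)
            · exact Or.inr ⟨L', hL', hg⟩

-- membership in B's double fold (positions × lengths)
theorem pv_mem_fold (g : Int → Int → Option String) (pos lens : List Int) (s : PySem.Set String) (r : String) :
    (r ∈ pos.foldl
        (fun (s : PySem.Set String) i =>
          lens.foldl
            (fun (s : PySem.Set String) L =>
              match g i L with
              | some hit => s.add hit
              | none => s) s) s)
      ↔ r ∈ s ∨ ∃ i ∈ pos, ∃ L ∈ lens, g i L = some r := by
  induction pos generalizing s with
  | nil => simp
  | cons i pos ih =>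
      simp only [List.foldl_cons, List.mem_cons]
      rw [ih, pv_mem_fold_inner]
      constructor
      · rintro ((h | ⟨L, hL, hg⟩) | ⟨i', hi', h⟩)
        · exact Or.inl h
        · exact Or.inr ⟨i, Or.inl rfl, L, hL, hg⟩
        · exact Or.inr ⟨i', Or.inr hi', h⟩
      · rintro (h | ⟨i', (rfl | hi'), h⟩)
        · exact Or.inl (Or.inl h)
        · exact Or.inl (Or.inr h)
        · exact Or.inr ⟨i', hi', h⟩

-- facts about the concrete table: tokens nonempty, lengths listed, lookups succeed
set_option maxRecDepth 8192 in
theorem pv_table_facts :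
    ∀ p ∈ pvTable, p.1.toList ≠ [] ∧ PySem.Str.len p.1 ∈ pvLens ∧ pvTokenRole.get? p.1 = some p.2 := by
  decide

set_option maxRecDepth 8192 in
theorem pv_lens_pos : ∀ L ∈ pvLens, 0 < L := by decide

set_option maxRecDepth 8192 in
theorem pv_items : pvTokenRole.items = pvTable := by decide

set_option maxRecDepth 8192 in
theorem pv_roles_unique : ∀ g ∈ pvGroups, ∀ g' ∈ pvGroups, g'.1 = g.1 → g' = g := by decide

-- a positive dict hit at (i, L) is exactly an occurrence of some table token with that role
theorem pv_P_iff (text : String) (r : String) :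
    (∃ i ∈ PySem.List.pyRange 0 (PySem.Str.len text) 1, ∃ L ∈ pvLens,
        pvTokenRole.get? (PySem.Str.slice text (some i) (some (i + L))) = some r)
      ↔ ∃ p ∈ pvTable, p.2 = r ∧ PySem.Str.isIn p.1 text = true := by
  constructor
  · rintro ⟨i, hi, L, hL, hget⟩
    obtain ⟨h0i, hilt⟩ := PySem.List.mem_pyRange_one.mp hi
    have hLpos := pv_lens_pos L hL
    have hmem : (PySem.Str.slice text (some i) (some (i + L)), r) ∈ pvTable := by
      rw [← pv_items]
      exact PySem.Dict.mem_items_of_get?_eq_some pvTokenRole hget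
    refine ⟨_, hmem, rfl, ?_⟩
    rw [PySem.Str.isIn_eq, ← PySem.Chars.exists_prefix_drop_iff_isIn]
    refine ⟨i.toNat, ?_⟩
    rw [PySem.Str.toList_slice, PySem.Chars.slice_eq_listSlice,
      PySem.List.slice_toNat _ h0i (by omega)]
    exact List.take_prefix _ _
  · rintro ⟨p, hp, hr, hin⟩
    obtain ⟨hne, hlen, hget⟩ := pv_table_facts p hp
    rw [PySem.Str.isIn_eq] at hin
    obtain ⟨j, hpre⟩ := (PySem.Chars.exists_prefix_drop_iff_isIn _ _).mpr hin
    have hjlt : j < text.toList.length := by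
      by_contra hge
      have hnil : text.toList.drop j = [] := List.drop_eq_nil_of_le (by omega)
      rw [hnil, List.prefix_nil] at hpre
      exact hne hpre
    refine ⟨(j : Int), PySem.List.mem_pyRange_one.mpr (by rw [PySem.Str.len_eq]; omega),
      PySem.Str.len p.1, hlen, ?_⟩
    have hslice : PySem.Str.slice text (some (j : Int)) (some ((j : Int) + PySem.Str.len p.1)) = p.1 := by
      apply String.toList_inj.mp
      rw [PySem.Str.toList_slice, PySem.Chars.slice_eq_listSlice, PySem.Str.len_eq,
        PySem.List.slice_natCast_add]
      exact (List.prefix_iff_eq_take.mp hpre).symm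
    rw [hslice, hget, hr]

-- table-level occurrence = group-level any
theorem pv_found_iff (text : String) (r : String) :
    (∃ p ∈ pvTable, p.2 = r ∧ PySem.Str.isIn p.1 text = true)
      ↔ ∃ g ∈ pvGroups, g.1 = r ∧ g.2.any (fun t => PySem.Str.isIn t text) = true := by
  simp only [pvTable, List.mem_flatMap, List.mem_map, List.any_eq_true]
  constructor
  · rintro ⟨p, ⟨g, hg, t, ht, rfl⟩, hr, hin⟩
    exact ⟨g, hg, hr, t, ht, hin⟩
  · rintro ⟨g, hg, hr, t, ht, hin⟩
    exact ⟨(t, g.1), ⟨g, hg, t, ht, rfl⟩, hr, hin⟩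

-- priority-list lookup = fold over the groups, given per-group membership facts
theorem pv_find_eq_foldr (text : String) (c : String → Bool) :
    ∀ (groups : List (String × List String)),
      (∀ g ∈ groups, c g.1 = g.2.any (fun t => PySem.Str.isIn t text)) →
      (match (groups.map (fun g => g.1)).find? c with
       | some role => role
       | none => "general")
        = groups.foldr (fun g acc => if g.2.any (fun t => PySem.Str.isIn t text) then g.1 else acc) "general" := by
  intro groups
  induction groups with
  | nil => intro _; rfl
  | cons g groups ih =>
      intro h
      have hg := h g (List.mem_cons_self ..)
      simp only [List.map_cons, List.foldr_cons, ← hg]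
      cases hc : c g.1 with
      | true => rw [List.find?_cons_of_pos (h := hc)]; simp
      | false =>
          rw [List.find?_cons_of_neg (h := by simp [hc])]
          simp only [Bool.false_eq_true, if_false]
          exact ih (fun g' hg' => h g' (List.mem_cons_of_mem _ hg'))

-- ===== VERDICT (by name: the statement is the Claim_ definition above) =====
-- the two loop bodies agree for every text
theorem pv_body (text : String) :
    (if (["hall", "hallway", "gang", "corridor", "entrance", "entry", "landing", "stairs", "stair"].any (fun token => PySem.Str.isIn token text)) then "transitional"
     else if (["bath", "badkamer", "toilet", "wc", "shower"].any (fun token => PySem.Str.isIn token text)) then "bathroom"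
     else if (["living", "woon", "salon", "tv room", "family room"].any (fun token => PySem.Str.isIn token text)) then "living"
     else if (["desk", "office", "bureau", "study", "computer"].any (fun token => PySem.Str.isIn token text)) then "desk"
     else if (["bed", "bedroom", "master", "guest room", "slaap"].any (fun token => PySem.Str.isIn token text)) then "bedroom"
     else if (["kitchen", "keuken", "dining", "eet"].any (fun token => PySem.Str.isIn token text)) then "kitchen"
     else if (["child", "kids", "kid", "nursery", "playroom"].any (fun token => PySem.Str.isIn token text)) then "child"
     else if (["attic", "zolder", "loft"].any (fun token => PySem.Str.isIn token text)) then "attic"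
     else if (["storage", "closet", "utility", "iot", "server", "technical", "tech", "boiler", "meter", "garage", "shed"].any (fun token => PySem.Str.isIn token text)) then "utility"
     else "general")
    = (match pvPriority.find? (fun role =>
        PySem.Set.contains
          ((PySem.List.pyRange 0 (PySem.Str.len text) 1).foldl
            (fun (found : PySem.Set String) i =>
              pvLens.foldl
                (fun (found : PySem.Set String) L =>
                  match pvTokenRole.get? (PySem.Str.slice text (some i) (some (i + L))) with
                  | some hit => found.add hit
                  | none => found)
                found)
            PySem.Set.empty) role) with
       | some role => role
       | none => "general") := by
  have hc : ∀ g ∈ pvGroups,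
      (PySem.Set.contains
        ((PySem.List.pyRange 0 (PySem.Str.len text) 1).foldl
          (fun (found : PySem.Set String) i =>
            pvLens.foldl
              (fun (found : PySem.Set String) L =>
                match pvTokenRole.get? (PySem.Str.slice text (some i) (some (i + L))) with
                | some hit => found.add hit
                | none => found)
              found)
          PySem.Set.empty) g.1) = g.2.any (fun t => PySem.Str.isIn t text) := by
    intro g hg
    rw [Bool.eq_iff_iff, PySem.Set.contains_iff,
      pv_mem_fold (fun i L => pvTokenRole.get? (PySem.Str.slice text (some i) (some (i + L))))]
    constructor
    · rintro (habs | hex)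
      · simp [PySem.Set.empty] at habs
      · obtain ⟨g', hg', hr', hany⟩ := (pv_found_iff text g.1).mp ((pv_P_iff text g.1).mp hex)
        rwa [pv_roles_unique g hg g' hg' hr'] at hany
    · intro hany
      exact Or.inr ((pv_P_iff text g.1).mpr ((pv_found_iff text g.1).mpr ⟨g, hg, rfl, hany⟩))
  rw [pvPriority, pv_find_eq_foldr text _ pvGroups (fun g hg => (hc g hg).symm ▸ rfl)]
  · simp only [pvGroups, List.foldr_cons, List.foldr_nil]

-- ===== VERDICT (by name: the statement is the Claim_ definition above) =====
theorem normalize_room_role_py_spec : Claim_equal_normalize_room_role_py := by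
  intro room_name room_payload _
  show normalize_room_role_py room_name room_payload = normalize_room_role_py_alt room_name room_payload
  delta normalize_room_role_py normalize_room_role_py_alt
  exact pv_body (pvRoomText room_name room_payload)
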